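-- pv_equiv track=rewrite | github.com/mprechl/Sokoban | game.py | extract_static_level
-- ===== SOURCE A (Python) =====
-- def extract_static_level(level):
--     """separates the static and dynamic parts of the level"""
--     player_pos = None
--     crate_positions = []
--     # make deep copy
--     stat = [list(i) for i in level]
--     for y, row in enumerate(stat):
--         for x, symbol in enumerate(row):
--             if symbol == "@":
--                 player_pos = (x, y)
--                 stat[y][x] = " "
--             elif symbol == "+":
--                 player_pos = (x, y)
--                 stat[y][x] = "."
--             elif symbol == "$":
--                 crate_positions.append((x, y))
--                 stat[y][x] = " "
--             elif symbol == "*":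
--                 crate_positions.append((x, y))
--                 stat[y][x] = "."
--     return stat, player_pos, crate_positions
-- ===== SOURCE B (Python) =====
-- def extract_static_level(level):
--     """separates the static and dynamic parts of the level"""
--     mapping = {"@": " ", "+": ".", "$": " ", "*": "."}
--     # pass 1: bulk transform to the static grid
--     stat = [[mapping.get(s, s) for s in row] for row in level]
--     # pass 2: locate the dynamic elements in the original level
--     player_pos = None
--     crate_positions = []
--     for y, row in enumerate(level):
--         for x, s in enumerate(row):
--             if s in ("@", "+"):
--                 player_pos = (x, y)
--             elif s in ("$", "*"):
--                 crate_positions.append((x, y))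
--     return stat, player_pos, crate_positions
-- ===== Notes on version B (the rewrite author's own statement) =====
-- stated objective: alternative
-- what changed: Replaces A's single fused classify-and-mutate loop by two separate passes: a bulk map that builds the whole static grid at once, then an independent scan of the original level that records the player (last wins) and crate positions.
import Mathlib
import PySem

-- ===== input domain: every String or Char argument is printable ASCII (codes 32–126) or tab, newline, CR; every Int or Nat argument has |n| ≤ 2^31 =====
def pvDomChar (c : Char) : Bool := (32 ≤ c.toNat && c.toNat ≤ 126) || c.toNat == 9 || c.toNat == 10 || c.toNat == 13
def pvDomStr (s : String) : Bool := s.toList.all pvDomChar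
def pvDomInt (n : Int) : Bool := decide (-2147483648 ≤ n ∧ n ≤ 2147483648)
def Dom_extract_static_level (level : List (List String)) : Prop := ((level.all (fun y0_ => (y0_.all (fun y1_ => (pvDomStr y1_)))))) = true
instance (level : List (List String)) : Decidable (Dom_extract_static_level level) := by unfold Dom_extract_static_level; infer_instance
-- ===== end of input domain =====

-- B separates A's fused classify-and-mutate loop into a bulk static-grid map plus an independent position scan (objective: alternative decomposition, same cost).


-- ===== PORT A =====
-- A walks the copied grid cell by cell, classifying each symbol, mutating the
-- current cell and threading (player_pos, crate_positions) through the walk.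
def extractA_row (y x : Int) (row : List String) (p : Option (Int × Int))
    (c : List (Int × Int)) : List String × Option (Int × Int) × List (Int × Int) :=
  match row with
  | [] => ([], p, c)
  | s :: rest =>
    let (s', p', c') :=
      if s = "@" then (" ", some (x, y), c)
      else if s = "+" then (".", some (x, y), c)
      else if s = "$" then (" ", p, c ++ [(x, y)])
      else if s = "*" then (".", p, c ++ [(x, y)])
      else (s, p, c)
    let (rest', p'', c'') := extractA_row y (x + 1) rest p' c'
    (s' :: rest', p'', c'')

def extractA_go (y : Int) (rows : List (List String)) (p : Option (Int × Int))
    (c : List (Int × Int)) : List (List String) × Option (Int × Int) × List (Int × Int) :=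
  match rows with
  | [] => ([], p, c)
  | row :: rest =>
    let (row', p', c') := extractA_row y 0 row p c
    let (rest', p'', c'') := extractA_go (y + 1) rest p' c'
    (row' :: rest', p'', c'')

def extract_static_level (level : List (List String)) :
    List (List String) × (Option (Int × Int)) × (List (Int × Int)) :=
  extractA_go 0 level none []

-- ===== PORT B =====
-- B: pass 1 maps every symbol through the static mapping; pass 2 scans the
-- original level for the dynamic elements.
def bMap (s : String) : String :=
  if s = "@" then " " else if s = "+" then "." else if s = "$" then " "
  else if s = "*" then "." else s

def bScanRow (y x : Int) (row : List String)
    (st : Option (Int × Int) × List (Int × Int)) : Option (Int × Int) × List (Int × Int) :=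
  match row with
  | [] => st
  | s :: rest =>
    bScanRow y (x + 1) rest
      (if s = "@" ∨ s = "+" then (some (x, y), st.2)
       else if s = "$" ∨ s = "*" then (st.1, st.2 ++ [(x, y)])
       else st)

def bScan (y : Int) (rows : List (List String))
    (st : Option (Int × Int) × List (Int × Int)) : Option (Int × Int) × List (Int × Int) :=
  match rows with
  | [] => st
  | row :: rest => bScan (y + 1) rest (bScanRow y 0 row st)

def extract_static_level_alt (level : List (List String)) :
    List (List String) × (Option (Int × Int)) × (List (Int × Int)) :=
  let stat := level.map (fun row => row.map bMap)
  let (p, c) := bScan 0 level (none, [])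
  (stat, p, c)

-- ===== PRECONDITION & SPEC =====
def Spec_extract_static_level (level : List (List String)) (out : List (List String) × (Option (Int × Int)) × (List (Int × Int))) : Prop := out = extract_static_level_alt level
instance (level : List (List String)) (out : List (List String) × (Option (Int × Int)) × (List (Int × Int))) : Decidable (Spec_extract_static_level level out) := by unfold Spec_extract_static_level; infer_instance

-- ===== CLAIM (what is proved, stated in full; the proofs are below) =====
def Claim_equal_extract_static_level : Prop := ∀ (level : List (List String)), Dom_extract_static_level level → Spec_extract_static_level level (extract_static_level level)

-- ===== LEMMAS AND PROOFS =====
theorem extractA_row_eq (y : Int) (row : List String) :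
    ∀ (x : Int) (p : Option (Int × Int)) (c : List (Int × Int)),
      extractA_row y x row p c = (row.map bMap, bScanRow y x row (p, c)) := by
  induction row with
  | nil => intro x p c; rfl
  | cons s rest ih =>
    intro x p c
    simp only [extractA_row, bScanRow, List.map, bMap]
    by_cases h1 : s = "@"
    · simp [h1, ih]
    · by_cases h2 : s = "+"
      · simp [h2, ih]
      · by_cases h3 : s = "$"
        · simp [h3, ih]
        · by_cases h4 : s = "*"
          · simp [h4, ih]
          · simp [h1, h2, h3, h4, ih]

theorem extractA_go_eq (rows : List (List String)) :
    ∀ (y : Int) (p : Option (Int × Int)) (c : List (Int × Int)),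
      extractA_go y rows p c = (rows.map (fun row => row.map bMap), bScan y rows (p, c)) := by
  induction rows with
  | nil => intro y p c; rfl
  | cons row rest ih =>
    intro y p c
    simp only [extractA_go, extractA_row_eq, bScan, List.map, ih]

-- ===== VERDICT (by name: the statement is the Claim_ definition above) =====
theorem extract_static_level_spec : Claim_equal_extract_static_level := by
  intro level _
  show extract_static_level level = extract_static_level_alt level
  simp only [extract_static_level, extract_static_level_alt, extractA_go_eq]
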